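-- pv_equiv track=rewrite | github.com/y0-x-0y/sts2-commander | overlay/display.py | _summarize_route
-- ===== SOURCE A (Python) =====
-- def _summarize_route(types):
--     """Summarize route composition: 精×1 火×2 etc."""
--     elite_n = sum(1 for t in types if t == "Elite")
--     rest_n = sum(1 for t in types if t in ("Rest", "RestSite"))
--     shop_n = sum(1 for t in types if t == "Shop")
--     p = []
--     if elite_n: p.append(f"精×{elite_n}")
--     if rest_n: p.append(f"火×{rest_n}")
--     if shop_n: p.append(f"店×{shop_n}")
--     return " ".join(p) or "纯怪"
-- ===== SOURCE B (Python) =====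
-- _CATS = {"Elite": 0, "Rest": 1, "RestSite": 1, "Shop": 2}
-- _LABELS = ("精", "火", "店")
--
-- def _summarize_route(types):
--     """Summarize route composition: 精×1 火×2 etc."""
--     n = [0, 0, 0]
--     for t in types:
--         i = _CATS.get(t)
--         if i is not None:
--             n[i] += 1
--     p = [f"{lab}×{c}" for lab, c in zip(_LABELS, n) if c]
--     return " ".join(p) or "纯怪"
-- ===== Notes on version B (the rewrite author's own statement) =====
-- stated objective: alternative
-- what changed: Replaces three separate sum-comprehension scans and hard-coded branch-per-category appends with one pass driven by a classification dict into a counter array, plus table-driven formatting via zip+filter over a label table.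
import Mathlib
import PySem

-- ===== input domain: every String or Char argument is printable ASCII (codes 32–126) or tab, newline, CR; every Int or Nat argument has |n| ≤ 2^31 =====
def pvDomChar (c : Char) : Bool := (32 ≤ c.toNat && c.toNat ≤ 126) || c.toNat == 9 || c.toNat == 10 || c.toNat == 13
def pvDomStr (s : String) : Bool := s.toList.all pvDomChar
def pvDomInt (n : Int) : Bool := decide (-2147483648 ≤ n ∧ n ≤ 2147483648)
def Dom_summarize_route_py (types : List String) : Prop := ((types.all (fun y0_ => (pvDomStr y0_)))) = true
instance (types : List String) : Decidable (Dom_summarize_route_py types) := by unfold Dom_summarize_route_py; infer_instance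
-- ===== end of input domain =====

-- ===== PORT A =====
-- B replaces A's three scans and per-category branches with one dict-driven counting pass and table-driven formatting (alternative decomposition, same cost).
def summarize_route_py (types : List String) : String :=
  let elite_n : Int := types.foldl (fun acc t => if t = "Elite" then acc + 1 else acc) 0
  let rest_n : Int := types.foldl (fun acc t => if t = "Rest" ∨ t = "RestSite" then acc + 1 else acc) 0
  let shop_n : Int := types.foldl (fun acc t => if t = "Shop" then acc + 1 else acc) 0
  let p : List String := []
  let p := if elite_n != 0 then p ++ ["精×" ++ PySem.Int.toStr elite_n] else p
  let p := if rest_n != 0 then p ++ ["火×" ++ PySem.Int.toStr rest_n] else p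
  let p := if shop_n != 0 then p ++ ["店×" ++ PySem.Int.toStr shop_n] else p
  let j := PySem.Str.join " " p
  if j != "" then j else "纯怪"

-- ===== PORT B =====
-- _CATS: the classification dict (module-level constant in Source B)
def pvCats : PySem.Dict String Int :=
  PySem.Dict.ofList [("Elite", 0), ("Rest", 1), ("RestSite", 1), ("Shop", 2)]

-- _LABELS
def pvLabels : List String := ["精", "火", "店"]

-- n[i] += 1 for a category index i from pvCats (always a literal 0/1/2, nonnegative, so toNat is exact here)
def summarize_route_py_alt (types : List String) : String :=
  let n : List Int := types.foldl
    (fun (n : List Int) t =>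
      match pvCats.get? t with
      | some i => n.set i.toNat ((n.getD i.toNat 0) + 1)
      | none => n) [0, 0, 0]
  let p : List String :=
    ((pvLabels.zip n).filter (fun lc => lc.2 != 0)).map
      (fun lc => lc.1 ++ "×" ++ PySem.Int.toStr lc.2)
  let j := PySem.Str.join " " p
  if j != "" then j else "纯怪"

-- ===== PRECONDITION & SPEC =====
def Spec_summarize_route_py (types : List String) (out : String) : Prop := out = summarize_route_py_alt types
instance (types : List String) (out : String) : Decidable (Spec_summarize_route_py types out) := by unfold Spec_summarize_route_py; infer_instance

-- ===== CLAIM (what is proved, stated in full; the proofs are below) =====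
def Claim_equal_summarize_route_py : Prop := ∀ (types : List String), Dom_summarize_route_py types → Spec_summarize_route_py types (summarize_route_py types)

-- ===== LEMMAS AND PROOFS =====

-- pvCats misses every string other than its four keys
theorem pvCats_get?_of_ne (t : String) (g1 : t ≠ "Elite") (g2 : t ≠ "Rest")
    (g3 : t ≠ "RestSite") (g4 : t ≠ "Shop") : pvCats.get? t = none := by
  have hmk : pvCats = PySem.Dict.mk [("Elite", 0), ("Rest", 1), ("RestSite", 1), ("Shop", 2)] := by decide
  rw [hmk]
  simp [PySem.Dict.get?, beq_iff_eq]
  exact ⟨fun h => g1 h.symm, fun h => g2 h.symm, fun h => g3 h.symm, fun h => g4 h.symm⟩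

-- the dict-driven counting pass computes the three separate counting folds componentwise
theorem alt_fold_eq (types : List String) (e r s : Int) :
    types.foldl
      (fun (n : List Int) t =>
        match pvCats.get? t with
        | some i => n.set i.toNat ((n.getD i.toNat 0) + 1)
        | none => n) [e, r, s]
    = [types.foldl (fun acc t => if t = "Elite" then acc + 1 else acc) e,
       types.foldl (fun acc t => if t = "Rest" ∨ t = "RestSite" then acc + 1 else acc) r,
       types.foldl (fun acc t => if t = "Shop" then acc + 1 else acc) s] := by
  induction types generalizing e r s with
  | nil => rfl
  | cons t ts ih =>
    simp only [List.foldl_cons]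
    by_cases h1 : t = "Elite"
    · subst h1; simpa [pvCats, PySem.Dict.ofList, PySem.Dict.get?] using ih (e + 1) r s
    · by_cases h2 : t = "Rest" ∨ t = "RestSite"
      · have h3 : t ≠ "Shop" := by rcases h2 with rfl | rfl <;> simp
        rcases h2 with rfl | rfl <;>
          simpa [pvCats, PySem.Dict.ofList, PySem.Dict.get?] using ih e (r + 1) s
      · by_cases h3 : t = "Shop"
        · subst h3; simpa [pvCats, PySem.Dict.ofList, PySem.Dict.get?] using ih e r (s + 1)
        · have hn := pvCats_get?_of_ne t h1 (fun h => h2 (Or.inl h)) (fun h => h2 (Or.inr h)) h3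
          have h2' : ¬(t = "Rest" ∨ t = "RestSite") := h2
          simpa [hn, h1, h2', h3] using ih e r s

-- the table-driven filter/map over the counts equals A's branch-per-category list construction
theorem parts_eq (e r s : Int) :
    ((pvLabels.zip [e, r, s]).filter (fun lc => lc.2 != 0)).map
        (fun lc => lc.1 ++ "×" ++ PySem.Int.toStr lc.2)
    = (let p : List String := []
       let p := if e != 0 then p ++ ["精×" ++ PySem.Int.toStr e] else p
       let p := if r != 0 then p ++ ["火×" ++ PySem.Int.toStr r] else p
       if s != 0 then p ++ ["店×" ++ PySem.Int.toStr s] else p) := by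
  by_cases h1 : e = 0 <;> by_cases h2 : r = 0 <;> by_cases h3 : s = 0 <;>
    simp [pvLabels, bne_iff_ne, h1, h2, h3]

-- ===== VERDICT (by name: the statement is the Claim_ definition above) =====
theorem summarize_route_py_spec : Claim_equal_summarize_route_py := by
  intro types _
  unfold Spec_summarize_route_py summarize_route_py summarize_route_py_alt
  simp only [alt_fold_eq, parts_eq]
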